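-- pv_equiv track=rewrite | github.com/qiyueming/LAMP_Primers | old_primer.py | piece_together
-- ===== SOURCE A (Python) =====
-- def piece_together(remainings,minimum_overlap=4,max_overlap=5,current="",pieces=[]):
--     """
--     piece together a list of sequences with given overlaps.
--     """
--     find = False
--     for i in range(minimum_overlap,max_overlap+1):
--         overlap = current[-i:]
--         for k,s in enumerate(remainings):
--             if overlap == s[0:i]:
--                 newremainings = remainings.copy()
--                 newremainings.pop(k)
--                 find = True
--                 newpieces = pieces.copy()
--                 newpieces.append(s)
--                 yield from piece_together(newremainings,minimum_overlap,max_overlap,current=current + s[i:],pieces=newpieces)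
--     if not find:
--         yield current,pieces
-- ===== SOURCE B (Python) =====
-- def piece_together(remainings, minimum_overlap=4, max_overlap=5, current="", pieces=[]):
--     """
--     piece together a list of sequences with given overlaps.
--     Iterative DFS with an explicit stack instead of recursion.
--     """
--     stack = [(list(remainings), current, list(pieces))]
--     while stack:
--         rem, cur, pcs = stack.pop()
--         children = []
--         for i in range(minimum_overlap, max_overlap + 1):
--             overlap = cur[-i:]
--             for k, s in enumerate(rem):
--                 if overlap == s[0:i]:
--                     children.append((rem[:k] + rem[k + 1:], cur + s[i:], pcs + [s]))
--         if not children: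
--             yield cur, pcs
--         else:
--             stack.extend(reversed(children))
-- ===== Notes on version B (the rewrite author's own statement) =====
-- stated objective: alternative
-- what changed: A's recursive generator (recursion with a find flag, yielding at leaves) is replaced by an iterative DFS driven by an explicit stack of (remainings, current, pieces) frames: each popped frame's matching continuations are collected into a children list, leaves are yielded directly, and children are pushed in reverse so the yielded sequence equals A's pre-order.
import Mathlib
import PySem

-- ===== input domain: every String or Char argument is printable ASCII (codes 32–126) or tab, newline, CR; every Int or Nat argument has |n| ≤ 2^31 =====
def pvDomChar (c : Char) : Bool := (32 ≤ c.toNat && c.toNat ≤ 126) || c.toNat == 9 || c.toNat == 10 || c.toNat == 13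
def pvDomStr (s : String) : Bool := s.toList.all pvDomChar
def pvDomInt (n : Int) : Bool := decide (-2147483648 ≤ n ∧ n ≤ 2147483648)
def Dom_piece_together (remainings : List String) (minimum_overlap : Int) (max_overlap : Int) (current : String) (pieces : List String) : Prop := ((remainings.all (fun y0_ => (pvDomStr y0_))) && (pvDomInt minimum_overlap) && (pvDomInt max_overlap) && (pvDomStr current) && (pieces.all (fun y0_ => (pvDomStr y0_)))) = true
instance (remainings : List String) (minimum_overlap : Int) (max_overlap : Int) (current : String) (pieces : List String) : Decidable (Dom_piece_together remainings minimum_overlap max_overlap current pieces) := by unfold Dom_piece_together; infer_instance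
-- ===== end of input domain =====

-- B replaces A's recursive generator by an explicit stack-driven iterative DFS (children of a frame
-- collected first, pushed in reverse, leaves yielded as reached); objective: alternative decomposition.
-- Both Pythons are generators; the equivalence is about the materialised yielded sequence (list(...)).

-- ===== PORT A =====
-- A, literally: nested `for i in range(...)` / `for k,s in enumerate(remainings)` loops folding the
-- state (find, yielded-so-far); each recursive call removes one element of `remainings`, so the
-- Nat fuel `remainings.length + 1` is only a totality guard (the 0 branch is unreachable).
def pieceAuxA : Nat → List String → Int → Int → String → List String → List (String × List String)
  | 0, _, _, _, _, _ => []
  | f + 1, rem, mo, Mo, cur, pcs =>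
    let st :=
      (PySem.List.pyRange mo (Mo + 1) 1).foldl (fun st i =>
        let overlap := PySem.Str.slice cur (some (-i)) none          -- current[-i:]
        (PySem.List.enumerate rem 0).foldl (fun st ks =>
          if overlap == PySem.Str.slice ks.2 (some 0) (some i) then  -- overlap == s[0:i]
            -- newremainings = remainings.copy(); newremainings.pop(k) — k in range, so pop? is some
            let newrem := ((PySem.List.pop? rem ks.1).getD ("", [])).2
            (true, st.2 ++ pieceAuxA f newrem mo Mo (cur ++ PySem.Str.slice ks.2 (some i) none) (pcs ++ [ks.2]))
          else st) st)
        ((false, []) : Bool × List (String × List String))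
    if !st.1 then st.2 ++ [(cur, pcs)] else st.2

def piece_together (remainings : List String) (minimum_overlap : Int) (max_overlap : Int) (current : String) (pieces : List String) : List (String × List String) :=
  pieceAuxA (remainings.length + 1) remainings minimum_overlap max_overlap current pieces

-- ===== PORT B =====
-- Source B's inner double loop: all matching continuations of one frame (the `children` list)
def childrenB (rem : List String) (mo Mo : Int) (cur : String) (pcs : List String) :
    List (List String × String × List String) :=
  (PySem.List.pyRange mo (Mo + 1) 1).foldl (fun acc i =>
    let overlap := PySem.Str.slice cur (some (-i)) none
    (PySem.List.enumerate rem 0).foldl (fun acc ks =>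
      if overlap == PySem.Str.slice ks.2 (some 0) (some i) then
        acc ++ [(PySem.List.slice rem none (some ks.1) ++ PySem.List.slice rem (some (ks.1 + 1)) none,  -- rem[:k] + rem[k+1:]
                 cur ++ PySem.Str.slice ks.2 (some i) none, pcs ++ [ks.2])]
      else acc) acc) []

-- `childrenB` in closed flatMap form (used for the termination guard and throughout the proofs)
theorem childrenB_eq (rem : List String) (mo Mo : Int) (cur : String) (pcs : List String) :
    childrenB rem mo Mo cur pcs =
      (PySem.List.pyRange mo (Mo + 1) 1).flatMap (fun i =>
        (PySem.List.enumerate rem 0).flatMap (fun ks =>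
          if PySem.Str.slice cur (some (-i)) none == PySem.Str.slice ks.2 (some 0) (some i) then
            [(PySem.List.slice rem none (some ks.1) ++ PySem.List.slice rem (some (ks.1 + 1)) none,
              cur ++ PySem.Str.slice ks.2 (some i) none, pcs ++ [ks.2])]
          else [])) := by
  unfold childrenB
  rw [PySem.List.foldl_congr_mem _ _ (fun acc i =>
        acc ++ (PySem.List.enumerate rem 0).flatMap (fun ks =>
          if PySem.Str.slice cur (some (-i)) none == PySem.Str.slice ks.2 (some 0) (some i) then
            [(PySem.List.slice rem none (some ks.1) ++ PySem.List.slice rem (some (ks.1 + 1)) none,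
              cur ++ PySem.Str.slice ks.2 (some i) none, pcs ++ [ks.2])]
          else []) ) _ ?_]
  · rw [PySem.List.foldl_append_eq_flatMap]; simp
  · intro acc i _
    rw [PySem.List.foldl_congr_mem _ _ (fun acc ks =>
        acc ++ (if PySem.Str.slice cur (some (-i)) none == PySem.Str.slice ks.2 (some 0) (some i) then
            [(PySem.List.slice rem none (some ks.1) ++ PySem.List.slice rem (some (ks.1 + 1)) none,
              cur ++ PySem.Str.slice ks.2 (some i) none, pcs ++ [ks.2])]
          else []) ) _ ?_]
    · rw [PySem.List.foldl_append_eq_flatMap]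
    · intro acc ks _
      by_cases h : (PySem.Str.slice cur (some (-i)) none == PySem.Str.slice ks.2 (some 0) (some i)) = true <;> simp [h]

-- every child frame drops exactly one element of `rem` (termination of the fuel bound `nodes`)
theorem mem_childrenB_length (rem : List String) (mo Mo : Int) (cur : String) (pcs : List String)
    (c : List String × String × List String) (hc : c ∈ childrenB rem mo Mo cur pcs) :
    c.1.length + 1 = rem.length := by
  rw [childrenB_eq] at hc
  simp only [List.mem_flatMap] at hc
  obtain ⟨i, -, ks, hks, hc⟩ := hc
  rw [PySem.List.mem_enumerate_iff] at hks
  obtain ⟨k, hk, rfl⟩ := hks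
  split at hc
  · simp only [List.mem_singleton] at hc
    subst hc
    have h0 : ((0 : Int) + (k : Int)) = ((k : Int)) := by ring
    simp only [h0]
    rw [PySem.List.slice_to rem (by positivity)]
    rw [show ((k : Int) + 1) = ((k + 1 : Nat) : Int) by push_cast; ring]
    rw [PySem.List.slice_from rem (by positivity)]
    simp only [List.length_append, List.length_take, List.length_drop, Int.toNat_natCast]
    omega
  · simp at hc

-- exact number of frames Source B's while-loop pops when started on this single frame;
-- used only as the (proved sufficient) fuel that makes `loopB` total.
def nodes (rem : List String) (mo Mo : Int) (cur : String) (pcs : List String) : Nat :=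
  1 + ((childrenB rem mo Mo cur pcs).attach.map (fun c => nodes c.1.1 mo Mo c.1.2.1 c.1.2.2)).sum
termination_by rem.length
decreasing_by
  have := mem_childrenB_length rem mo Mo cur pcs c.1 c.2
  omega

-- Source B's `while stack:` loop; head of the list = top of the stack, so `stack.extend(reversed(children))`
-- followed by popping from the end is `cs ++ rest`.  Fuel 0 is unreachable (loopB_spec below).
def loopB (mo Mo : Int) : Nat → List (List String × String × List String) → List (String × List String)
  | _, [] => []
  | 0, _ :: _ => []
  | f + 1, (rem, cur, pcs) :: rest =>
    let cs := childrenB rem mo Mo cur pcs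
    if cs.isEmpty then (cur, pcs) :: loopB mo Mo f rest
    else loopB mo Mo f (cs ++ rest)

def piece_together_alt (remainings : List String) (minimum_overlap : Int) (max_overlap : Int) (current : String) (pieces : List String) : List (String × List String) :=
  loopB minimum_overlap max_overlap
    (nodes remainings minimum_overlap max_overlap current pieces)
    [(remainings, current, pieces)]

-- ===== PRECONDITION & SPEC =====
def Spec_piece_together (remainings : List String) (minimum_overlap : Int) (max_overlap : Int) (current : String) (pieces : List String) (out : List (String × List String)) : Prop := out = piece_together_alt remainings minimum_overlap max_overlap current pieces
instance (remainings : List String) (minimum_overlap : Int) (max_overlap : Int) (current : String) (pieces : List String) (out : List (String × List String)) : Decidable (Spec_piece_together remainings minimum_overlap max_overlap current pieces out) := by unfold Spec_piece_together; infer_instance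

-- ===== CLAIM (what is proved, stated in full; the proofs are below) =====
def Claim_equal_piece_together : Prop := ∀ (remainings : List String) (minimum_overlap : Int) (max_overlap : Int) (current : String) (pieces : List String), Dom_piece_together remainings minimum_overlap max_overlap current pieces → Spec_piece_together remainings minimum_overlap max_overlap current pieces (piece_together remainings minimum_overlap max_overlap current pieces)

-- ===== LEMMAS AND PROOFS =====

-- two loop-shape rewrites for A's paired (find, yielded) state
theorem foldl_pair_split {ι : Type} (p : ι → Bool) (g : ι → List (String × List String))
    (l : List ι) (st : Bool × List (String × List String)) :
    l.foldl (fun st x => if p x then (true, st.2 ++ g x) else st) st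
      = (st.1 || l.any p, st.2 ++ l.flatMap (fun x => if p x then g x else [])) := by
  induction l generalizing st with
  | nil => simp
  | cons x t ih =>
    by_cases h : p x = true <;>
      simp [h, ih, List.flatMap_cons, List.append_assoc]

theorem foldl_pair_split2 {ι : Type} (b : ι → Bool) (G : ι → List (String × List String))
    (l : List ι) (st : Bool × List (String × List String)) :
    l.foldl (fun st i => (st.1 || b i, st.2 ++ G i)) st
      = (st.1 || l.any b, st.2 ++ l.flatMap G) := by
  induction l generalizing st with
  | nil => simp
  | cons x t ih => simp [ih, Bool.or_assoc, List.append_assoc]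

-- the recursive call A makes for a matching (k, s) equals `piece_together` of B's child frame
theorem child_bridge (rem : List String) (mo Mo : Int) (cur : String) (pcs : List String)
    (i : Int) (ks : Int × String) (hks : ks ∈ PySem.List.enumerate rem 0) :
    pieceAuxA rem.length (((PySem.List.pop? rem ks.1).getD ("", [])).2) mo Mo
        (cur ++ PySem.Str.slice ks.2 (some i) none) (pcs ++ [ks.2])
      = piece_together (PySem.List.slice rem none (some ks.1) ++ PySem.List.slice rem (some (ks.1 + 1)) none)
          mo Mo (cur ++ PySem.Str.slice ks.2 (some i) none) (pcs ++ [ks.2]) := by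
  rw [PySem.List.mem_enumerate_iff] at hks
  obtain ⟨k, hk, rfl⟩ := hks
  have h0 : ((0 : Int) + (k : Int)) = ((k : Int)) := by ring
  simp only [h0]
  rw [PySem.List.pop?_natCast rem k hk]
  rw [PySem.List.slice_to rem (by positivity)]
  rw [show ((k : Int) + 1) = ((k + 1 : Nat) : Int) by push_cast; ring]
  rw [PySem.List.slice_from rem (by positivity)]
  simp only [Int.toNat_natCast, Option.getD_some]
  rw [piece_together, ← List.eraseIdx_eq_take_drop_succ]
  congr 1
  rw [List.length_eraseIdx]
  simp only [hk, if_pos]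
  omega

-- A's value after one unfolding, in terms of B's children of the frame
theorem piece_together_char (rem : List String) (mo Mo : Int) (cur : String) (pcs : List String) :
    piece_together rem mo Mo cur pcs =
      if childrenB rem mo Mo cur pcs = [] then [(cur, pcs)]
      else (childrenB rem mo Mo cur pcs).flatMap (fun c => piece_together c.1 mo Mo c.2.1 c.2.2) := by
  rw [piece_together, pieceAuxA]
  rw [PySem.List.foldl_congr_mem _ _ (fun st i =>
        (st.1 || (PySem.List.enumerate rem 0).any
            (fun ks => PySem.Str.slice cur (some (-i)) none == PySem.Str.slice ks.2 (some 0) (some i)),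
         st.2 ++ (PySem.List.enumerate rem 0).flatMap (fun ks =>
            if PySem.Str.slice cur (some (-i)) none == PySem.Str.slice ks.2 (some 0) (some i) then
              pieceAuxA rem.length (((PySem.List.pop? rem ks.1).getD ("", [])).2) mo Mo
                (cur ++ PySem.Str.slice ks.2 (some i) none) (pcs ++ [ks.2])
            else []))) _
      (fun st i _ => foldl_pair_split _ _ _ st)]
  rw [foldl_pair_split2]
  simp only [Bool.false_or, List.nil_append]
  by_cases h : childrenB rem mo Mo cur pcs = []
  · -- no child: `find` stays False and the loop yields nothing; the final yield fires
    have hp : ∀ i ∈ PySem.List.pyRange mo (Mo + 1) 1, ∀ ks ∈ PySem.List.enumerate rem 0,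
        (PySem.Str.slice cur (some (-i)) none == PySem.Str.slice ks.2 (some 0) (some i)) = false := by
      rw [childrenB_eq] at h
      simp only [List.flatMap_eq_nil_iff] at h
      intro i hi ks hks
      have := h i hi ks hks
      by_contra hb
      simp only [Bool.not_eq_false] at hb
      simp [hb] at this
    have hany : (PySem.List.pyRange mo (Mo + 1) 1).any (fun i =>
        (PySem.List.enumerate rem 0).any
          (fun ks => PySem.Str.slice cur (some (-i)) none == PySem.Str.slice ks.2 (some 0) (some i))) = false := by
      simp only [List.any_eq_false]
      intro i hi hin
      rw [List.any_eq_true] at hin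
      obtain ⟨ks, hks, hcond⟩ := hin
      simp [hp i hi ks hks] at hcond
    rw [hany]
    have hflat : (PySem.List.pyRange mo (Mo + 1) 1).flatMap (fun i =>
        (PySem.List.enumerate rem 0).flatMap (fun ks =>
          if PySem.Str.slice cur (some (-i)) none == PySem.Str.slice ks.2 (some 0) (some i) then
            pieceAuxA rem.length (((PySem.List.pop? rem ks.1).getD ("", [])).2) mo Mo
              (cur ++ PySem.Str.slice ks.2 (some i) none) (pcs ++ [ks.2])
          else [])) = [] := by
      simp only [List.flatMap_eq_nil_iff]
      intro i hi ks hks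
      simp [hp i hi ks hks]
    rw [hflat]
    simp [h]
  · -- at least one child: `find` becomes True and the loop yields the concatenated recursions
    have hany : (PySem.List.pyRange mo (Mo + 1) 1).any (fun i =>
        (PySem.List.enumerate rem 0).any
          (fun ks => PySem.Str.slice cur (some (-i)) none == PySem.Str.slice ks.2 (some 0) (some i))) = true := by
      by_contra hb
      apply h
      rw [childrenB_eq]
      simp only [Bool.not_eq_true, List.any_eq_false] at hb
      simp only [List.flatMap_eq_nil_iff]
      intro i hi ks hks
      simp [hb i hi ks hks]
    rw [hany]
    simp only [Bool.not_true, if_neg h, Bool.false_eq_true, if_false]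
    rw [childrenB_eq, List.flatMap_assoc]
    refine List.flatMap_congr (fun i hi => ?_)
    rw [List.flatMap_assoc]
    refine List.flatMap_congr (fun ks hks => ?_)
    by_cases hpi : (PySem.Str.slice cur (some (-i)) none == PySem.Str.slice ks.2 (some 0) (some i)) = true
    · simp only [hpi, if_true, List.flatMap_cons, List.flatMap_nil, List.append_nil]
      exact child_bridge rem mo Mo cur pcs i ks hks
    · simp [hpi]

-- total fuel a stack needs
def neededB (mo Mo : Int) (stack : List (List String × String × List String)) : Nat :=
  (stack.map (fun c => nodes c.1 mo Mo c.2.1 c.2.2)).sum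

theorem nodes_eq (rem : List String) (mo Mo : Int) (cur : String) (pcs : List String) :
    nodes rem mo Mo cur pcs = 1 + neededB mo Mo (childrenB rem mo Mo cur pcs) := by
  rw [nodes, neededB]
  rw [show (fun (c : {x // x ∈ childrenB rem mo Mo cur pcs}) => nodes c.1.1 mo Mo c.1.2.1 c.1.2.2)
        = (fun c : List String × String × List String => nodes c.1 mo Mo c.2.1 c.2.2) ∘ Subtype.val from rfl,
     ← List.map_map, List.attach_map_subtype_val]

theorem loopB_spec (mo Mo : Int) : ∀ (f : Nat) (stack : List (List String × String × List String)),
    neededB mo Mo stack ≤ f →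
    loopB mo Mo f stack = stack.flatMap (fun c => piece_together c.1 mo Mo c.2.1 c.2.2) := by
  intro f
  induction f with
  | zero =>
    intro stack hst
    match stack with
    | [] => simp [loopB]
    | c :: rest =>
      exfalso
      have := nodes_eq c.1 mo Mo c.2.1 c.2.2
      simp only [neededB, List.map_cons, List.sum_cons] at hst
      omega
  | succ f ih =>
    intro stack hst
    match stack with
    | [] => simp [loopB]
    | (rem, cur, pcs) :: rest =>
      have hsplit : neededB mo Mo ((rem, cur, pcs) :: rest)
          = nodes rem mo Mo cur pcs + neededB mo Mo rest := by
        simp [neededB]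
      by_cases hcs : childrenB rem mo Mo cur pcs = []
      · have hfuel : neededB mo Mo rest ≤ f := by
          rw [hsplit, nodes_eq] at hst; omega
        rw [loopB]
        simp only [hcs, List.isEmpty_nil, if_true]
        rw [ih rest hfuel, List.flatMap_cons, piece_together_char, hcs]
        simp
      · have hfuel : neededB mo Mo (childrenB rem mo Mo cur pcs ++ rest) ≤ f := by
          have : neededB mo Mo (childrenB rem mo Mo cur pcs ++ rest)
              = neededB mo Mo (childrenB rem mo Mo cur pcs) + neededB mo Mo rest := by
            simp [neededB]
          rw [hsplit, nodes_eq] at hst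
          omega
        rw [loopB]
        rw [if_neg (by simpa [List.isEmpty_iff] using hcs)]
        rw [ih _ hfuel, List.flatMap_append, List.flatMap_cons,
          piece_together_char rem mo Mo cur pcs, if_neg hcs]

-- ===== VERDICT (by name: the statement is the Claim_ definition above) =====
theorem piece_together_spec : Claim_equal_piece_together := by
  intro rem mo Mo cur pcs _
  show piece_together rem mo Mo cur pcs = piece_together_alt rem mo Mo cur pcs
  rw [piece_together_alt, loopB_spec mo Mo _ _ (by simp [neededB])]
  simp
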